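-- pv_equiv track=rewrite | github.com/vujnovicmarko/Prevodenje_programskih_jezika | lab2/pomocne.py | zapocinjeIzravnoZnakovima
-- ===== SOURCE A (Python) =====
-- def zapocinjeIzravnoZnakovima(nz, produkcije, prazniZnakovi):
--     izravniZnakovi = set()
--     for desno in produkcije[nz]:
--         znakovi = desno.split(" ")
--         for i in range(len(znakovi)):
--             if i == 0:
--                 izravniZnakovi.add(znakovi[i])
--             else:
--                 if znakovi[i - 1] in prazniZnakovi:
--                     izravniZnakovi.add(znakovi[i])
--                 else:
--                     break
--
--     return izravniZnakovi
-- ===== SOURCE B (Python) =====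
-- def zapocinjeIzravnoZnakovima(nz, produkcije, prazniZnakovi):
--     izravniZnakovi = set()
--     for desno in produkcije[nz]:
--         znakovi = desno.split(" ")
--         izravniZnakovi.update(t for i, t in enumerate(znakovi)
--                               if all(u in prazniZnakovi for u in znakovi[:i]))
--     return izravniZnakovi
-- ===== Notes on version B (the rewrite author's own statement) =====
-- stated objective: alternative
-- what changed: A token of a split right-hand side is collected iff ALL tokens before it are nullable, tested statelessly with all() over each prefix inside a generator fed to set.update - a brute-force prefix-membership characterization with no break, no index state and no early exit, instead of A's stateful left-to-right scan that stops at the first non-nullable token.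
import Mathlib
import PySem

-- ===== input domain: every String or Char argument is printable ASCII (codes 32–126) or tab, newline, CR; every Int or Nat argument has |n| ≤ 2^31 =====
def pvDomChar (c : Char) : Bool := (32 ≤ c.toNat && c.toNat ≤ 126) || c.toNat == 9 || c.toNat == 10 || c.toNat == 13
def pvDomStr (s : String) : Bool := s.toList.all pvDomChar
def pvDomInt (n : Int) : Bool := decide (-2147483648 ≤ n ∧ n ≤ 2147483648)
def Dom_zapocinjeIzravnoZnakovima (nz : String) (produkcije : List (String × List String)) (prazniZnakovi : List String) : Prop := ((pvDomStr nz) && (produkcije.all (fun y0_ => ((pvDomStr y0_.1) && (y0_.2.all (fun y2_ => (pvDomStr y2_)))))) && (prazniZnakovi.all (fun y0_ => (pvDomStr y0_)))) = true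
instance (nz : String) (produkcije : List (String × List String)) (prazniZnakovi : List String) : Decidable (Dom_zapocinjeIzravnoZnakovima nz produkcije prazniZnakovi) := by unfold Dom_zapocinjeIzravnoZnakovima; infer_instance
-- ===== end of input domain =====

-- B replaces A's stateful early-break scan by a stateless brute-force test: a token is
-- collected iff all tokens before it are nullable (objective: alternative).

-- ===== PORT A =====
-- inner 'for i in range(len(znakovi)): …' with its break, as index recursion
def zapocinjeIzravnoZnakovimaLoopA (znakovi prazniZnakovi : List String) (i : Nat) (s : PySem.Set String) : PySem.Set String :=
  if h : i < znakovi.length then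
    if i = 0 then
      zapocinjeIzravnoZnakovimaLoopA znakovi prazniZnakovi (i + 1) (PySem.Set.add s znakovi[i])
    else if prazniZnakovi.contains znakovi[i - 1] then
      zapocinjeIzravnoZnakovimaLoopA znakovi prazniZnakovi (i + 1) (PySem.Set.add s znakovi[i])
    else s
  else s
termination_by znakovi.length - i

def zapocinjeIzravnoZnakovima (nz : String) (produkcije : List (String × List String)) (prazniZnakovi : List String) : List String :=
  (((PySem.Dict.ofList produkcije).get? nz).getD []).foldl
    (fun izravniZnakovi desno =>
      zapocinjeIzravnoZnakovimaLoopA ((PySem.Str.split? desno " ").getD []) prazniZnakovi 0 izravniZnakovi)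
    PySem.Set.empty

-- ===== PORT B =====
-- 'izravniZnakovi.update(t for i, t in enumerate(znakovi) if all(u in prazniZnakovi for u in znakovi[:i]))'
def zapocinjeIzravnoZnakovimaRhsB (prazniZnakovi : List String) (s : PySem.Set String) (desno : String) : PySem.Set String :=
  let znakovi := (PySem.Str.split? desno " ").getD []
  PySem.Set.update s
    (((PySem.List.enumerate znakovi 0).filter
        (fun p => (PySem.List.slice znakovi none (some p.1)).all (fun u => prazniZnakovi.contains u))).map
      (fun p => p.2))

def zapocinjeIzravnoZnakovima_alt (nz : String) (produkcije : List (String × List String)) (prazniZnakovi : List String) : List String :=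
  (((PySem.Dict.ofList produkcije).get? nz).getD []).foldl
    (zapocinjeIzravnoZnakovimaRhsB prazniZnakovi) PySem.Set.empty

-- ===== PRECONDITION & SPEC =====
-- Pre_: nz must be a key of produkcije (otherwise A raises KeyError)
def Pre_zapocinjeIzravnoZnakovima (nz : String) (produkcije : List (String × List String)) (prazniZnakovi : List String) : Prop :=
  nz ∈ produkcije.map Prod.fst
instance (nz : String) (produkcije : List (String × List String)) (prazniZnakovi : List String) : Decidable (Pre_zapocinjeIzravnoZnakovima nz produkcije prazniZnakovi) := by unfold Pre_zapocinjeIzravnoZnakovima; infer_instance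

def pvWitness_zapocinjeIzravnoZnakovima : String × (List (String × List String)) × List String :=
  ("S", [("S", ["a B", "B c", "B B"]), ("B", ["b"])], ["B"])

def Spec_zapocinjeIzravnoZnakovima (nz : String) (produkcije : List (String × List String)) (prazniZnakovi : List String) (out : List String) : Prop := out = zapocinjeIzravnoZnakovima_alt nz produkcije prazniZnakovi
instance (nz : String) (produkcije : List (String × List String)) (prazniZnakovi : List String) (out : List String) : Decidable (Spec_zapocinjeIzravnoZnakovima nz produkcije prazniZnakovi out) := by unfold Spec_zapocinjeIzravnoZnakovima; infer_instance

-- ===== CLAIM (what is proved, stated in full; the proofs are below) =====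
def Claim_equal_zapocinjeIzravnoZnakovima : Prop := ∀ (nz : String) (produkcije : List (String × List String)) (prazniZnakovi : List String), Dom_zapocinjeIzravnoZnakovima nz produkcije prazniZnakovi → Pre_zapocinjeIzravnoZnakovima nz produkcije prazniZnakovi → Spec_zapocinjeIzravnoZnakovima nz produkcije prazniZnakovi (zapocinjeIzravnoZnakovima nz produkcije prazniZnakovi)

-- ===== LEMMAS AND PROOFS =====

-- proof-side view of A's inner loop from index 1 on: recursion on (prev, cur) of the list suffix
def goA (prazniZnakovi : List String) : List String → PySem.Set String → PySem.Set String
  | p :: c :: rest, s =>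
      if prazniZnakovi.contains p then goA prazniZnakovi (c :: rest) (PySem.Set.add s c) else s
  | _, s => s

theorem loopA_eq_goA (l prazniZnakovi : List String) :
    ∀ (n i : Nat) (s : PySem.Set String), n = l.length - i →
      zapocinjeIzravnoZnakovimaLoopA l prazniZnakovi (i + 1) s = goA prazniZnakovi (l.drop i) s := by
  intro n
  induction n with
  | zero =>
    intro i s h
    have hle : l.length ≤ i := by omega
    rw [zapocinjeIzravnoZnakovimaLoopA, List.drop_eq_nil_of_le hle]
    simp [goA]
    omega
  | succ n ih =>
    intro i s h
    have hi : i < l.length := by omega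
    rw [zapocinjeIzravnoZnakovimaLoopA]
    have hdrop : l.drop i = l[i] :: l.drop (i + 1) := List.drop_eq_getElem_cons hi
    by_cases h1 : i + 1 < l.length
    · have hdrop1 : l.drop (i + 1) = l[i + 1] :: l.drop (i + 2) := List.drop_eq_getElem_cons h1
      rw [dif_pos h1, if_neg (by omega)]
      rw [hdrop, hdrop1, goA]
      simp only [show i + 1 - 1 = i from rfl]
      by_cases hc : prazniZnakovi.contains l[i]
      · rw [if_pos hc, if_pos hc, ih (i + 1) _ (by omega), hdrop1]
      · rw [if_neg hc, if_neg hc]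
    · have hlen : l.length = i + 1 := by omega
      rw [dif_neg h1, hdrop, List.drop_eq_nil_of_le (by omega), goA]
      intro p c rest hpc
      simp at hpc

theorem goA_eq_update (prazniZnakovi : List String) :
    ∀ (l : List String) (s : PySem.Set String),
      goA prazniZnakovi l s =
        PySem.Set.update s (l.tail.take (l.findIdx (fun t => !(prazniZnakovi.contains t)))) := by
  intro l
  induction l with
  | nil => intro s; simp [goA, PySem.Set.update]
  | cons p t ih =>
    intro s
    cases t with
    | nil => simp [goA, PySem.Set.update]
    | cons c rest =>
      rw [goA]
      by_cases hc : p ∈ prazniZnakovi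
      · rw [if_pos (by simpa using hc), ih]
        simp [List.findIdx_cons, hc, PySem.Set.update]
      · rw [if_neg (by simpa using hc)]
        simp [List.findIdx_cons, hc, PySem.Set.update]

theorem loopA_zero_eq_take (prazniZnakovi : List String) (tokens : List String) (s : PySem.Set String) :
    zapocinjeIzravnoZnakovimaLoopA tokens prazniZnakovi 0 s =
      PySem.Set.update s (tokens.take (tokens.findIdx (fun t => !(prazniZnakovi.contains t)) + 1)) := by
  cases tokens with
  | nil =>
    rw [zapocinjeIzravnoZnakovimaLoopA]
    simp [PySem.Set.update]
  | cons t0 rest =>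
    rw [zapocinjeIzravnoZnakovimaLoopA]
    rw [dif_pos (by simp), if_pos rfl]
    rw [loopA_eq_goA _ _ ((t0 :: rest).length - 0) 0 _ rfl]
    rw [List.drop_zero, goA_eq_update]
    simp only [List.tail_cons, List.take_succ_cons]
    by_cases hc : t0 ∈ prazniZnakovi
    · simp [List.findIdx_cons, hc, PySem.Set.update]
    · simp [List.findIdx_cons, hc, PySem.Set.update]

-- B side: the brute-force prefix-nullable filter selects exactly the tokens up to and
-- including the first non-nullable one.
theorem enumerate_shift {α : Type} (xs : List α) : ∀ (k : Int),
    PySem.List.enumerate xs (k + 1) =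
      (PySem.List.enumerate xs k).map (fun p => (p.1 + 1, p.2)) := by
  induction xs with
  | nil => intro k; simp [PySem.List.enumerate_nil]
  | cons a t ih =>
    intro k
    rw [PySem.List.enumerate_cons, PySem.List.enumerate_cons, List.map_cons, ih (k + 1)]

theorem selB_eq_take (prazniZnakovi : List String) :
    ∀ (l : List String),
      ((PySem.List.enumerate l 0).filter
          (fun p => (PySem.List.slice l none (some p.1)).all (fun u => prazniZnakovi.contains u))).map
        (fun p => p.2)
      = l.take (l.findIdx (fun t => !(prazniZnakovi.contains t)) + 1) := by
  intro l
  induction l with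
  | nil => simp [PySem.List.enumerate_nil]
  | cons a t ih =>
    rw [PySem.List.enumerate_cons, show (0 : Int) + 1 = 0 + 1 from rfl, enumerate_shift]
    rw [List.filter_cons]
    have h0 : (PySem.List.slice (a :: t) none (some (0 : Int))).all
        (fun u => prazniZnakovi.contains u) = true := by
      rw [show (0 : Int) = ((0 : Nat) : Int) from rfl, PySem.List.slice_to_natCast]
      simp
    rw [if_pos h0, List.filter_map, List.map_cons, List.map_map]
    have hcong : ∀ p ∈ PySem.List.enumerate t 0,
        ((fun p : Int × String => (PySem.List.slice (a :: t) none (some p.1)).all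
            (fun u => prazniZnakovi.contains u)) ∘ fun p => (p.1 + 1, p.2)) p
        = (prazniZnakovi.contains a &&
            (PySem.List.slice t none (some p.1)).all (fun u => prazniZnakovi.contains u)) := by
      intro p hp
      obtain ⟨k, hk, rfl⟩ := (PySem.List.mem_enumerate_iff _ _ _).1 hp
      simp only [Function.comp]
      have h1 : ((0 : Int) + k) + 1 = ((k + 1 : Nat) : Int) := by push_cast; ring
      have h2 : ((0 : Int) + k) = ((k : Nat) : Int) := by ring
      rw [h1, h2, PySem.List.slice_to_natCast, PySem.List.slice_to_natCast,
          List.take_succ_cons, List.all_cons]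
    rw [List.filter_congr hcong]
    by_cases hc : prazniZnakovi.contains a
    · have : (fun p : Int × String => (prazniZnakovi.contains a &&
          (PySem.List.slice t none (some p.1)).all (fun u => prazniZnakovi.contains u)))
          = (fun p : Int × String =>
            (PySem.List.slice t none (some p.1)).all (fun u => prazniZnakovi.contains u)) := by
        funext p; rw [hc, Bool.true_and]
      rw [this]
      have : ((PySem.List.enumerate t 0).filter
          (fun p => (PySem.List.slice t none (some p.1)).all (fun u => prazniZnakovi.contains u))).map
          ((fun p : Int × String => p.2) ∘ fun p => (p.1 + 1, p.2))
          = t.take (t.findIdx (fun x => !(prazniZnakovi.contains x)) + 1) := by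
        rw [show ((fun p : Int × String => p.2) ∘ fun p : Int × String => (p.1 + 1, p.2))
              = (fun p : Int × String => p.2) from rfl, ih]
      rw [this, List.findIdx_cons]
      have hc' : a ∈ prazniZnakovi := by simpa using hc
      simp [hc']
    · have : (fun p : Int × String => (prazniZnakovi.contains a &&
          (PySem.List.slice t none (some p.1)).all (fun u => prazniZnakovi.contains u)))
          = (fun _ : Int × String => false) := by
        funext p
        rw [Bool.not_eq_true] at hc
        rw [hc, Bool.false_and]
      rw [this, List.filter_false, List.map_nil, List.findIdx_cons]
      have hc' : a ∉ prazniZnakovi := by simpa using hc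
      simp [hc']

theorem rhsB_eq_loopA (prazniZnakovi : List String) (s : PySem.Set String) (desno : String) :
    zapocinjeIzravnoZnakovimaRhsB prazniZnakovi s desno
      = zapocinjeIzravnoZnakovimaLoopA ((PySem.Str.split? desno " ").getD []) prazniZnakovi 0 s := by
  rw [loopA_zero_eq_take]
  simp only [zapocinjeIzravnoZnakovimaRhsB, selB_eq_take]

-- ===== VERDICT (by name: the statement is the Claim_ definition above) =====
theorem zapocinjeIzravnoZnakovima_spec : Claim_equal_zapocinjeIzravnoZnakovima := by
  intro nz produkcije prazniZnakovi _ _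
  unfold Spec_zapocinjeIzravnoZnakovima zapocinjeIzravnoZnakovima zapocinjeIzravnoZnakovima_alt
  congr 1
  funext s desno
  rw [rhsB_eq_loopA]
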